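-- pv_equiv track=rewrite | github.com/kr2020lbh/Problem | Python/PROGRAMMERS/LEVEL 3/최고의집합.py | solution
-- ===== SOURCE A (Python) =====
-- def solution(n, s):
--     if (s // n) == 0:return [-1]
--     answer = []
--     while n != 0:
--         prev = s // n
--         s = s - prev
--         n = n -1
--         answer.append(prev)
--     return answer
-- ===== SOURCE B (Python) =====
-- def solution(n, s):
--     q = s // n
--     if q == 0:
--         return [-1]
--     r = s % n
--     return [q] * (n - r) + [q + 1] * r
-- ===== Notes on version B (the rewrite author's own statement) =====
-- stated objective: simpler
-- what changed: Replaces the while loop that recomputes s//n each iteration with a closed-form even distribution [q]*(n-r)+[q+1]*r from one divmod.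
import Mathlib
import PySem

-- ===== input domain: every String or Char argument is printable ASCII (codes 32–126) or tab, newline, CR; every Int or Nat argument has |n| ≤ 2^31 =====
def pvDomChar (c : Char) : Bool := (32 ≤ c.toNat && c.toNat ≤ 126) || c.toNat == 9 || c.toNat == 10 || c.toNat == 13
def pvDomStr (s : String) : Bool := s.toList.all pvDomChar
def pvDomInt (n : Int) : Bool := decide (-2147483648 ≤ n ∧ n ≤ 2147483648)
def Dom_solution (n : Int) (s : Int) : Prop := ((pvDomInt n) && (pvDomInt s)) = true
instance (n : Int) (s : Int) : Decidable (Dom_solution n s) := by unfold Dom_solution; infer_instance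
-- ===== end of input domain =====

-- B replaces A's while loop (which recomputes s//n each step) by one closed-form
-- even distribution [q]*(n-r)+[q+1]*r from a single divmod; objective: simpler.

-- ===== PORT A =====
-- while n != 0: prev = s//n; s -= prev; n -= 1; answer.append(prev)
-- fuel = n.toNat gives exactly the n iterations the Python loop performs when n > 0
def solutionLoop : Nat → Int → Int → List Int → List Int
  | 0, _, _, acc => acc
  | f+1, n, s, acc =>
    if n ≠ 0 then
      solutionLoop f (n - 1) (s - PySem.Int.floordiv s n) (acc ++ [PySem.Int.floordiv s n])
    else acc

def solution (n : Int) (s : Int) : List Int :=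
  if PySem.Int.floordiv s n = 0 then [-1]
  else solutionLoop n.toNat n s []

-- ===== PORT B =====
def solution_alt (n : Int) (s : Int) : List Int :=
  let q := PySem.Int.floordiv s n
  if q = 0 then [-1]
  else
    let r := PySem.Int.mod s n
    List.replicate (n - r).toNat q ++ List.replicate r.toNat (q + 1)

-- ===== PRECONDITION & SPEC =====
-- Pre_ is exactly where A returns: n = 0 raises ZeroDivisionError, and for n < 0 the
-- while loop never terminates unless s//n == 0 (i.e. n < s ≤ 0), where A returns [-1].
def Pre_solution (n : Int) (s : Int) : Prop := 0 < n ∨ (n < 0 ∧ n < s ∧ s ≤ 0)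
instance (n : Int) (s : Int) : Decidable (Pre_solution n s) := by unfold Pre_solution; infer_instance
def pvWitness_solution : Int × Int := (3, 7)

def Spec_solution (n : Int) (s : Int) (out : List Int) : Prop := out = solution_alt n s
instance (n : Int) (s : Int) (out : List Int) : Decidable (Spec_solution n s out) := by unfold Spec_solution; infer_instance

-- ===== CLAIM (what is proved, stated in full; the proofs are below) =====
def Claim_equal_solution : Prop := ∀ (n : Int) (s : Int), Dom_solution n s → Pre_solution n s → Spec_solution n s (solution n s)

-- ===== LEMMAS AND PROOFS =====

lemma loop_closed : ∀ (k : Nat) (s : Int) (acc : List Int), 0 < k →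
    solutionLoop k (k : Int) s acc =
      acc ++ (List.replicate ((k : Int) - s % (k : Int)).toNat (s / (k : Int)) ++
              List.replicate (s % (k : Int)).toNat (s / (k : Int) + 1)) := by
  intro k
  induction k with
  | zero => intro s acc h; omega
  | succ k ih =>
    intro s acc _
    have hk1 : ((k + 1 : Nat) : Int) ≠ 0 := by positivity
    have hkpos : (0 : Int) < ((k + 1 : Nat) : Int) := by positivity
    set m : Int := ((k + 1 : Nat) : Int) with hm
    have hfd : PySem.Int.floordiv s m = s / m := PySem.Int.floordiv_eq_ediv_of_pos hkpos
    set q : Int := s / m with hq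
    set r : Int := s % m with hr
    have hsr : m * q + r = s := by rw [hq, hr]; exact Int.mul_ediv_add_emod s m
    have hmq : m * q = (k : Int) * q + q := by rw [hm]; push_cast; ring
    have hr0 : 0 ≤ r := Int.emod_nonneg s hk1
    have hrm : r < m := Int.emod_lt_of_pos s hkpos
    simp only [solutionLoop, hk1, if_pos, ne_eq, not_false_eq_true, hfd]
    rcases Nat.eq_zero_or_pos k with hk0 | hkpos'
    · -- k = 0 : one iteration, n becomes 0
      subst hk0
      have hm1 : m = 1 := by simp [hm]
      have : r = 0 := by omega
      simp [solutionLoop, hm1, this]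
    · -- k ≥ 1 : use IH on s' = s - q with divisor k
      have hmk : m - 1 = (k : Int) := by push_cast [hm]; ring
      rw [hmk, ih (s - q) (acc ++ [q]) hkpos']
      have hkz : ((k : Nat) : Int) ≠ 0 := by exact_mod_cast Nat.pos_iff_ne_zero.mp hkpos'
      have hkposZ : (0 : Int) < (k : Int) := by exact_mod_cast hkpos'
      by_cases hcase : r = (k : Int)
      · -- remainder k: new quotient q+1, remainder 0
        have hA : s - q = (k : Int) * (q + 1) := by
          have h2 : (k : Int) * (q + 1) = (k : Int) * q + (k : Int) := by ring
          linarith [hmq, hsr, h2]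
        have hdiv : (s - q) / (k : Int) = q + 1 := by
          rw [hA]; exact Int.mul_ediv_cancel_left _ hkz
        have hmod : (s - q) % (k : Int) = 0 := by
          rw [hA]; exact Int.mul_emod_right _ _
        rw [hdiv, hmod]
        have h1 : (m - r).toNat = 1 := by omega
        have h2 : ((k : Int) - 0).toNat = k := by omega
        have h3 : r.toNat = k := by omega
        simp [h1, h3, List.append_assoc]
      · -- remainder r < k: quotient stays q, remainder r
        have hrk : r < (k : Int) := lt_of_le_of_ne (by omega) hcase
        have hA : s - q = r + (k : Int) * q := by linarith [hmq, hsr]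
        have hdiv : (s - q) / (k : Int) = q := by
          rw [hA, Int.add_mul_ediv_left r q hkz, Int.ediv_eq_zero_of_lt hr0 hrk]
          ring
        have hmod : (s - q) % (k : Int) = r := by
          rw [hA, Int.add_mul_emod_self_left]
          exact Int.emod_eq_of_lt hr0 hrk
        rw [hdiv, hmod]
        have h1 : (m - r).toNat = ((k : Int) - r).toNat + 1 := by omega
        rw [h1, List.replicate_succ]
        simp [List.append_assoc]

-- ===== VERDICT (by name: the statement is the Claim_ definition above) =====
theorem solution_spec : Claim_equal_solution := by
  intro n s _ hpre
  unfold Spec_solution solution solution_alt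
  rcases hpre with hn | ⟨h1, h2, h3⟩
  case inr =>
    have hq0 : PySem.Int.floordiv s n = 0 := by
      rw [← PySem.Int.floordiv_neg_neg s n,
          PySem.Int.floordiv_eq_ediv_of_pos (by omega : (0:Int) < -n)]
      exact Int.ediv_eq_zero_of_lt (by omega) (by omega)
    simp [hq0]
  case inl =>
    have hfd : PySem.Int.floordiv s n = s / n := PySem.Int.floordiv_eq_ediv_of_pos hn
    have hmd : PySem.Int.mod s n = s % n := PySem.Int.mod_eq_emod_of_pos hn
    by_cases hq : PySem.Int.floordiv s n = 0
    · simp [hq]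
    · simp only [hq, if_neg, not_false_eq_true]
      have hk : (n.toNat : Int) = n := Int.toNat_of_nonneg (le_of_lt hn)
      have hkpos : 0 < n.toNat := by omega
      have := loop_closed n.toNat s [] hkpos
      rw [hk] at this
      rw [this, hfd, hmd]
      simp
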